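-- pv_equiv track=rewrite | github.com/kojunwoan/programmers | 프로그래머스/lv2/12973. 짝지어 제거하기/짝지어 제거하기.py | solution
-- ===== SOURCE A (Python) =====
-- def solution(s):
--     stack = []
--     for x in s:
--         if not stack or stack[-1] != x:
--             stack.append(x)
--         else:
--             stack.pop()
--     return int(not stack)
-- ===== SOURCE B (Python) =====
-- def _one_pass(cs):
--     out = []
--     i = 0
--     while i < len(cs):
--         if i + 1 < len(cs) and cs[i] == cs[i + 1]:
--             i += 2
--         else:
--             out.append(cs[i])
--             i += 1
--     return out
--
--
-- def solution(s):
--     cs = list(s)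
--     while True:
--         nxt = _one_pass(cs)
--         if nxt == cs:
--             return int(not cs)
--         cs = nxt
-- ===== Notes on version B (the rewrite author's own statement) =====
-- stated objective: alternative
-- what changed: Replaces the single-pass stack with repeated single scans that delete adjacent equal pairs until a fixpoint, returning 1 iff the fixpoint is empty (correct by confluence of pair removal).
import Mathlib
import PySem

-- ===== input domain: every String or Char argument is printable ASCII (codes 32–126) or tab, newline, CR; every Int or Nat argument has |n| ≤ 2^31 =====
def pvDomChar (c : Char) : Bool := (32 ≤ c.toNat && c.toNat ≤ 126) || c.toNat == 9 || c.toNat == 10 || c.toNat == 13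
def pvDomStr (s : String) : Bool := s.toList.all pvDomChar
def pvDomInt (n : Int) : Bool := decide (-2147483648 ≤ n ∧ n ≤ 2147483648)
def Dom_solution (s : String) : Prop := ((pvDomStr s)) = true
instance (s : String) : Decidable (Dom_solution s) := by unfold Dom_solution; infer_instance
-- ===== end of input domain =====

-- B replaces A's single-pass stack with repeated scans that delete adjacent equal pairs
-- until a fixpoint, returning 1 iff the fixpoint is empty; objective: alternative algorithm.

-- ===== PORT A =====
-- literal transliteration: stack kept in Python order (top = last element)
def solution (s : String) : Int :=
  let stack := s.toList.foldl
    (fun stack x =>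
      if stack = [] ∨ stack.getLast? ≠ some x then stack ++ [x] else stack.dropLast) []
  if stack = [] then 1 else 0

-- ===== PORT B =====
-- one left-to-right scan of Source B's `_one_pass`: skip both chars of an adjacent equal
-- pair (i += 2), otherwise keep the char (i += 1)
def onePass : List Char → List Char
  | [] => []
  | [a] => [a]
  | a :: b :: t => if a = b then onePass t else a :: onePass (b :: t)

-- termination lemmas for the fixpoint loop (cited by the port's decreasing_by)
theorem onePass_length_le : ∀ (l : List Char), (onePass l).length ≤ l.length := by
  intro l
  induction l using onePass.induct with
  | case1 => simp [onePass]
  | case2 a => simp [onePass]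
  | case3 b t ih => simp [onePass]; omega
  | case4 a b t h ih =>
      simp only [onePass, if_neg h, List.length_cons]
      simp only [List.length_cons] at ih
      omega

theorem onePass_length_lt (l : List Char) (h : onePass l ≠ l) :
    (onePass l).length < l.length := by
  induction l using onePass.induct with
  | case1 => simp [onePass] at h
  | case2 a => simp [onePass] at h
  | case3 b t ih =>
      simp [onePass]
      have := onePass_length_le t
      omega
  | case4 a b t hne ih =>
      simp only [onePass, if_neg hne] at h ⊢
      have h' : onePass (b :: t) ≠ b :: t := by
        intro he; exact h (by rw [he])
      simpa using Nat.succ_lt_succ (ih h')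

-- Source B's while-loop: iterate _one_pass to a fixpoint, then return int(not cs)
def fixLoop (cs : List Char) : Int :=
  let nxt := onePass cs
  if h : nxt = cs then (if cs = [] then 1 else 0) else fixLoop nxt
termination_by cs.length
decreasing_by exact onePass_length_lt cs h

def solution_alt (s : String) : Int := fixLoop s.toList

-- ===== PRECONDITION & SPEC =====
def Spec_solution (s : String) (out : Int) : Prop := out = solution_alt s
instance (s : String) (out : Int) : Decidable (Spec_solution s out) := by unfold Spec_solution; infer_instance

-- ===== CLAIM (what is proved, stated in full; the proofs are below) =====
def Claim_equal_solution : Prop := ∀ (s : String), Dom_solution s → Spec_solution s (solution s)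

-- ===== LEMMAS AND PROOFS =====

-- cons-form of A's stack step (top = head), used only for reasoning
def rstep (st : List Char) (x : Char) : List Char :=
  if st.head? = some x then st.tail else x :: st

def run (st : List Char) (l : List Char) : List Char := l.foldl rstep st

theorem stepA_eq_rstep (st : List Char) (x : Char) :
    (if st = [] ∨ st.getLast? ≠ some x then st ++ [x] else st.dropLast)
      = (rstep st.reverse x).reverse := by
  unfold rstep
  rcases eq_or_ne st [] with rfl | hne
  · simp
  · have hg : st.getLast? = st.reverse.head? := by
      rw [List.head?_reverse]
    have hd : st.reverse.tail.reverse = st.dropLast := by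
      rw [List.tail_reverse, List.reverse_reverse]
    by_cases hx : st.getLast? = some x
    · have h2 : st.reverse.head? = some x := hg ▸ hx
      simp [hne, hx]
    · have h2 : ¬ st.reverse.head? = some x := hg ▸ hx
      simp [hne, hx]

theorem foldl_stepA_eq (l : List Char) : ∀ (st : List Char),
    l.foldl (fun stack x =>
      if stack = [] ∨ stack.getLast? ≠ some x then stack ++ [x] else stack.dropLast) st
    = (run st.reverse l).reverse := by
  induction l with
  | nil => intro st; simp [run]
  | cons c t ih =>
      intro st
      simp only [List.foldl_cons, run]
      rw [stepA_eq_rstep, ih]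
      simp [run]

-- rstep preserves "no two adjacent equal chars" on the stack
theorem rstep_chain {st : List Char} (h : st.IsChain (· ≠ ·)) (x : Char) :
    (rstep st x).IsChain (· ≠ ·) := by
  unfold rstep
  split
  · exact h.tail
  · next hx =>
    refine List.isChain_cons.mpr ⟨?_, h⟩
    intro y hy he
    exact hx (by rw [hy, he])

-- pushing the same char twice onto a pair-free stack is the identity
theorem run_pair {st : List Char} (h : st.IsChain (· ≠ ·)) (c : Char) :
    rstep (rstep st c) c = st := by
  unfold rstep
  by_cases hx : st.head? = some c
  · cases st with
    | nil => simp at hx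
    | cons a t =>
        simp at hx
        subst hx
        cases t with
        | nil => simp
        | cons b t2 =>
            have hab : a ≠ b := (List.isChain_cons.mp h).1 b rfl
            simp [Ne.symm hab]
  · simp [hx]

-- one pass of pair removal does not change the final stack
theorem run_onePass (l : List Char) : ∀ (st : List Char), st.IsChain (· ≠ ·) →
    run st (onePass l) = run st l := by
  induction l using onePass.induct with
  | case1 => intro st _; simp [onePass]
  | case2 a => intro st _; simp [onePass]
  | case3 b t ih =>
      intro st hst
      rw [onePass, if_pos rfl, ih st hst]
      show run st t = run (rstep (rstep st b) b) t
      rw [run_pair hst]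
  | case4 a b t hne ih =>
      intro st hst
      rw [onePass, if_neg hne]
      show run (rstep st a) (onePass (b :: t)) = run (rstep st a) (b :: t)
      exact ih _ (rstep_chain hst a)

-- a fixpoint of onePass has no adjacent equal chars
theorem onePass_fix_chain (l : List Char) (h : onePass l = l) :
    l.IsChain (· ≠ ·) := by
  induction l using onePass.induct with
  | case1 => simp
  | case2 a => simp
  | case3 b t ih =>
      exfalso
      rw [onePass, if_pos rfl] at h
      have h1 := onePass_length_le t
      have h2 : (onePass t).length = t.length + 2 := by rw [h]; simp
      omega
  | case4 a b t hne ih =>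
      rw [onePass, if_neg hne] at h
      have ht : onePass (b :: t) = b :: t := by injection h
      refine List.isChain_cons.mpr ⟨?_, ih ht⟩
      intro y hy
      simp at hy
      subst hy
      exact hne
-- over a pair-free string the stack only accumulates (in reverse)
theorem run_no_pairs : ∀ (l : List Char) (st : List Char), l.IsChain (· ≠ ·) →
    (∀ c, l.head? = some c → st.head? ≠ some c) →
    run st l = l.reverse ++ st := by
  intro l
  induction l with
  | nil => intro st _ _; simp [run]
  | cons c t ih =>
      intro st hchain hhd
      have hstep : rstep st c = c :: st := by
        unfold rstep
        rw [if_neg (hhd c rfl)]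
      show run (rstep st c) t = (c :: t).reverse ++ st
      rw [hstep, ih (c :: st) hchain.tail]
      · simp
      · intro d hd hds
        have hcd : c ≠ d := (List.isChain_cons.mp hchain).1 d hd
        simp at hds
        exact hcd hds

-- fixLoop returns 1 iff the final stack of its argument is empty
theorem fixLoop_eq (l : List Char) :
    fixLoop l = (if run [] l = [] then 1 else 0) := by
  induction l using fixLoop.induct with
  | case1 x nxt hfix hnil =>
      rw [fixLoop, dif_pos hfix]
      simp [hnil, run]
  | case2 x nxt hfix hne =>
      rw [fixLoop, dif_pos hfix, if_neg hne]
      have hchain := onePass_fix_chain x hfix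
      have hrun : run ([] : List Char) x = x.reverse ++ [] := by
        apply run_no_pairs x [] hchain
        intro c _ hc; simp at hc
      rw [hrun]
      simp [hne]
  | case3 x nxt hne ih =>
      rw [fixLoop, dif_neg hne, ih]
      have hrw : run ([] : List Char) nxt = run [] x := run_onePass x [] (by simp)
      rw [hrw]

-- ===== VERDICT (by name: the statement is the Claim_ definition above) =====
theorem solution_spec : Claim_equal_solution := by
  intro s _
  unfold Spec_solution solution solution_alt
  rw [foldl_stepA_eq, fixLoop_eq]
  simp
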